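-- pv_equiv track=rewrite | github.com/aaalll3/AT | Validation/code_validation_construct.py | ASNAllocated
-- ===== SOURCE A (Python) =====
-- def ASNAllocated(arr):
--     for asn in arr:
--         asn = int(asn)
--         if asn == 23456 or asn == 0:
--             return False
--         elif asn > 399260:
--             return False
--         elif asn > 64495 and asn < 131072:
--             return False
--         elif asn > 141625 and asn < 196608:
--             return False
--         elif asn > 210331 and asn < 262144:
--             return False
--         elif asn > 270748 and asn < 327680:
--             return False
--         elif asn > 328703 and asn < 393216:
--             return False
--     return True
-- ===== SOURCE B (Python) =====
-- # B: flat sorted boundary array + hand-written binary search; an ASN is unallocated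
-- # iff the upper-bound index (count of boundaries <= asn) is ODD (parity of crossed
-- # boundaries), replacing A's if/elif interval cascade. Objective: alternative.
-- _BOUNDS = (0, 1, 23456, 23457, 64496, 131072, 141626, 196608,
--            210332, 262144, 270749, 327680, 328704, 393216, 399261)
--
-- def _bisect_right(x):
--     lo, hi = 0, 15
--     while lo < hi:
--         mid = (lo + hi) // 2
--         if _BOUNDS[mid] <= x:
--             lo = mid + 1
--         else:
--             hi = mid
--     return lo
--
-- def ASNAllocated(arr):
--     return all(_bisect_right(int(asn)) % 2 == 0 for asn in arr)
-- ===== Notes on version B (the rewrite author's own statement) =====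
-- stated objective: alternative
-- what changed: Replaced the if/elif interval cascade with a flat sorted array of the 15 range boundaries and a hand-written binary search: an ASN is unallocated iff the upper-bound index (number of boundaries <= asn) is odd.
import Mathlib
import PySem

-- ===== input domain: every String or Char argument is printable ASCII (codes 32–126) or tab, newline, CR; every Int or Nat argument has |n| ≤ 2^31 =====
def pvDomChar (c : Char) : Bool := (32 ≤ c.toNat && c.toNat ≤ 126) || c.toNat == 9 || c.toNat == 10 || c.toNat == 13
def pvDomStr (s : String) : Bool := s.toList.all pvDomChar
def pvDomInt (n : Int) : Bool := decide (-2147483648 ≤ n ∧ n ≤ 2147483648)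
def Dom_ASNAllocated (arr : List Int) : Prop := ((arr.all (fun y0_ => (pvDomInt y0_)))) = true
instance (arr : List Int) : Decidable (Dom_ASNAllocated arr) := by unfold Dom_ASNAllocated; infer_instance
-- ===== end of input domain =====

-- B: sorted boundary array + binary search; unallocated iff the upper-bound index is odd
-- (parity of crossed boundaries), instead of A's if/elif interval cascade (objective: alternative)

-- ===== PORT A =====
def ASNAllocated (arr : List Int) : Bool :=
  match arr with
  | [] => true
  | asn :: rest =>
    if asn == 23456 || asn == 0 then false
    else if asn > 399260 then false
    else if asn > 64495 && asn < 131072 then false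
    else if asn > 141625 && asn < 196608 then false
    else if asn > 210331 && asn < 262144 then false
    else if asn > 270748 && asn < 327680 then false
    else if asn > 328703 && asn < 393216 then false
    else ASNAllocated rest

-- ===== PORT B =====
def pvBounds : List Int :=
  [0, 1, 23456, 23457, 64496, 131072, 141626, 196608,
   210332, 262144, 270749, 327680, 328704, 393216, 399261]

-- the while loop of Source B's _bisect_right; on (lo,hi) = (0,15) it runs exactly 4
-- iterations (interval sizes 15 → 7 → 3 → 1 → 0), so fuel 4 is exact
def pvBisect (x : Int) (lo hi : Nat) (fuel : Nat) : Nat :=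
  match fuel with
  | 0 => lo
  | fuel + 1 =>
    if lo < hi then
      let mid := (lo + hi) / 2
      if pvBounds.getD mid 0 ≤ x then pvBisect x (mid + 1) hi fuel
      else pvBisect x lo mid fuel
    else lo

def ASNAllocated_alt (arr : List Int) : Bool :=
  arr.all (fun asn => pvBisect asn 0 15 4 % 2 == 0)

-- ===== PRECONDITION & SPEC =====
def Spec_ASNAllocated (arr : List Int) (out : Bool) : Prop := out = ASNAllocated_alt arr
instance (arr : List Int) (out : Bool) : Decidable (Spec_ASNAllocated arr out) := by unfold Spec_ASNAllocated; infer_instance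

-- ===== CLAIM (what is proved, stated in full; the proofs are below) =====
def Claim_equal_ASNAllocated : Prop := ∀ (arr : List Int), Dom_ASNAllocated arr → Spec_ASNAllocated arr (ASNAllocated arr)

-- ===== LEMMAS AND PROOFS =====

-- per-element agreement: binary-search parity equals the cascade's "allowed" test
theorem ASNAllocated_elem (asn : Int) :
    (pvBisect asn 0 15 4 % 2 == 0)
    = (!(asn == 23456 || asn == 0 || asn > 399260
         || (asn > 64495 && asn < 131072) || (asn > 141625 && asn < 196608)
         || (asn > 210331 && asn < 262144) || (asn > 270748 && asn < 327680)
         || (asn > 328703 && asn < 393216))) := by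
  simp only [pvBisect, pvBounds]
  norm_num
  split_ifs <;> simp <;> omega

theorem ASNAllocated_eq (arr : List Int) : ASNAllocated arr = ASNAllocated_alt arr := by
  induction arr with
  | nil => rfl
  | cons asn rest ih =>
    have hsplit : ASNAllocated_alt (asn :: rest) =
        ((pvBisect asn 0 15 4 % 2 == 0) && ASNAllocated_alt rest) := by
      simp [ASNAllocated_alt]
    rw [ASNAllocated, hsplit, ← ih, ASNAllocated_elem]
    split_ifs with h1 h2 h3 h4 h5 h6 h7 <;> simp_all <;> omega

-- ===== VERDICT (by name: the statement is the Claim_ definition above) =====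
theorem ASNAllocated_spec : Claim_equal_ASNAllocated := by
  intro arr _
  unfold Spec_ASNAllocated
  exact ASNAllocated_eq arr
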